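-- pv_equiv track=rewrite | github.com/eroicaleo/InterviewQuestions | SixCharPassword/GenTriplet.py | GenTriplet
-- ===== SOURCE A (Python) =====
-- def GenTriplet(password, length):
--     l = len(password)
--     if l <= length:
--         yield password
--     elif length == 1:
--         for c in password:
--             yield c
--     else:
--         for i in range(l-length+1):
--             for code in GenTriplet(password[i+1:], length-1):
--                 yield password[i] + code
-- ===== SOURCE B (Python) =====
-- # B: classic include/exclude recursion on the first character instead of A's
-- # positional loop with slices; same lexicographic order of combinations.
-- def GenTriplet(password, length):
--     if len(password) <= length:
--         yield password
--         return
--     def combs(s, k):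
--         if k == 1:
--             return list(s)
--         out = [s[0] + t for t in combs(s[1:], k - 1)]
--         if len(s) - 1 >= k:
--             out += combs(s[1:], k)
--         return out
--     for w in combs(password, length):
--         yield w
-- ===== Notes on version B (the rewrite author's own statement) =====
-- stated objective: alternative
-- what changed: Replaces A's positional loop (for each start index i, slice password[i+1:] and recurse with length-1) by the classic include/exclude recursion on the first character, which produces the same combinations in the same lexicographic order.
import Mathlib
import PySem

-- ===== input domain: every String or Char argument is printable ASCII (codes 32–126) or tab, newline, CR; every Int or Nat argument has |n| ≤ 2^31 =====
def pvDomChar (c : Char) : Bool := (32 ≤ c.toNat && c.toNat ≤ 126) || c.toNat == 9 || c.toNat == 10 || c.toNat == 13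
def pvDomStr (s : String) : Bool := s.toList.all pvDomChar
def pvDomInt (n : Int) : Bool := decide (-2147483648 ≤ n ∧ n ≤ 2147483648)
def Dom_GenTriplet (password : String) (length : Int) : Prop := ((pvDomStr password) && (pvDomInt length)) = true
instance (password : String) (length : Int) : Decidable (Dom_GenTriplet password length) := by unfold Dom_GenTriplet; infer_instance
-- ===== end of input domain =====

-- B replaces A's positional loop over start indices (slice + recurse on length-1)
-- by the classic include/exclude recursion on the first character; same output order.


-- ===== PORT A =====
-- Literal port of A on List Char; the results are char lists, turned into Strings
-- at the top level. 'password[i] + code' is exactly a cons of the indexed char.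
-- Fuel counts the recursion depth: on Pre_ (length ≥ 1 in the recursive branch)
-- fuel length.toNat + 1 never runs out; fuel 0 is only reached where Python's
-- recursion never returns (length ≤ 0 with a longer password).
def pvGenA : Nat → List Char → Int → List (List Char)
  | 0, _, _ => []
  | fuel + 1, pw, length =>
    let l : Int := PySem.List.len pw
    if l ≤ length then [pw]
    else if length = 1 then pw.map (fun c => [c])
    else
      (PySem.List.pyRange 0 (l - length + 1) 1).flatMap (fun i =>
        (pvGenA fuel (PySem.List.slice pw (some (i + 1)) none) (length - 1)).map
          (fun code => PySem.List.pyGetD pw i ' ' :: code))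

def GenTriplet (password : String) (length : Int) : List String :=
  (pvGenA (length.toNat + 1) password.toList length).map String.ofList

-- ===== PORT B =====
-- combs s k for 1 ≤ k ≤ |s|; the [] case is a totality guard only reached where
-- Python's combs would raise/diverge (never from GenTriplet_alt under Pre_).
def pvCombs (s : List Char) (k : Int) : List (List Char) :=
  if k = 1 then s.map (fun c => [c])
  else
    match s with
    | [] => []
    | c :: cs =>
      let out := (pvCombs cs (k - 1)).map (fun t => c :: t)
      if k ≤ (cs.length : Int) then out ++ pvCombs cs k else out
termination_by s.length

def GenTriplet_alt (password : String) (length : Int) : List String :=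
  if (password.toList.length : Int) ≤ length then [String.ofList password.toList]
  else (pvCombs password.toList length).map String.ofList

-- ===== PRECONDITION & SPEC =====
-- Pre_ excludes exactly the inputs (length ≤ 0 with len(password) > length) on
-- which A never returns: its recursion on length-1 has no base case there and
-- Python dies with RecursionError.
def Pre_GenTriplet (password : String) (length : Int) : Prop :=
  (password.toList.length : Int) ≤ length ∨ 1 ≤ length
instance (password : String) (length : Int) : Decidable (Pre_GenTriplet password length) := by
  unfold Pre_GenTriplet; infer_instance

def pvWitness_GenTriplet : String × Int := ("abcd", 2)

def Spec_GenTriplet (password : String) (length : Int) (out : List String) : Prop := out = GenTriplet_alt password length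
instance (password : String) (length : Int) (out : List String) : Decidable (Spec_GenTriplet password length out) := by unfold Spec_GenTriplet; infer_instance

-- ===== CLAIM (what is proved, stated in full; the proofs are below) =====
def Claim_equal_GenTriplet : Prop := ∀ (password : String) (length : Int), Dom_GenTriplet password length → Pre_GenTriplet password length → Spec_GenTriplet password length (GenTriplet password length)

-- ===== LEMMAS AND PROOFS =====

-- Unfolding lemmas for pvCombs (its equations go through the k = 1 test first).
lemma pvCombs_one (s : List Char) : pvCombs s 1 = s.map (fun c => [c]) := by
  rw [pvCombs.eq_def]; simp

lemma pvCombs_cons (c : Char) (cs : List Char) (k : Int) (h : k ≠ 1) :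
    pvCombs (c :: cs) k
      = (pvCombs cs (k - 1)).map (fun t => c :: t)
        ++ (if k ≤ (cs.length : Int) then pvCombs cs k else []) := by
  rw [pvCombs.eq_def]
  simp only [if_neg h]
  split_ifs <;> simp

-- pvCombs of a full-length selection is the single whole-list combination.
lemma pvCombs_full (s : List Char) (hs : s ≠ []) : pvCombs s (s.length : Int) = [s] := by
  induction s with
  | nil => exact absurd rfl hs
  | cons c cs ih =>
    by_cases h : cs = []
    · subst h; simpa using pvCombs_one [c]
    · have hlen : cs.length ≠ 0 := by simpa [List.length_eq_zero_iff] using h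
      have hk1 : ((c :: cs).length : Int) ≠ 1 := by
        simp only [List.length_cons]; push_cast; omega
      rw [pvCombs_cons c cs _ hk1]
      have hguard : ¬ (((c :: cs).length : Int) ≤ (cs.length : Int)) := by
        simp only [List.length_cons]; push_cast; omega
      rw [if_neg hguard]
      have hsub : ((c :: cs).length : Int) - 1 = (cs.length : Int) := by
        simp only [List.length_cons]; push_cast; omega
      rw [hsub, ih h]
      simp

-- The flatMap form of A's positional loop (with its recursive calls already
-- rewritten to pvCombs) equals pvCombs itself, for 2 ≤ k < |s|.
lemma flat_eq_pvCombs (k : Int) (h2 : 2 ≤ k) :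
    ∀ s : List Char, k < (s.length : Int) →
      (PySem.List.pyRange 0 ((s.length : Int) - k + 1) 1).flatMap
        (fun i => (pvCombs (s.drop (i + 1).toNat) (k - 1)).map
          (fun t => PySem.List.pyGetD s i ' ' :: t))
      = pvCombs s k := by
  intro s
  induction s with
  | nil => intro h; simp at h; omega
  | cons c cs ih =>
    intro hk
    set f : Int → List (List Char) := fun i =>
      (pvCombs ((c :: cs).drop (i + 1).toNat) (k - 1)).map
        (fun t => PySem.List.pyGetD (c :: cs) i ' ' :: t) with hf
    have hm : (0 : Int) < ((c :: cs).length : Int) - k + 1 := by omega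
    rw [PySem.List.pyRange_one_cons hm, List.flatMap_cons]
    -- head term
    have hhead : f 0 = (pvCombs cs (k - 1)).map (fun t => c :: t) := by
      simp [hf, PySem.List.pyGetD_zero_cons]
    -- tail terms: reindex onto cs
    have htail :
        (PySem.List.pyRange (0 + 1) (((c :: cs).length : Int) - k + 1) 1).flatMap f
        = (PySem.List.pyRange 0 (((cs.length : Int) - k + 1)) 1).flatMap
            (fun j => (pvCombs (cs.drop (j + 1).toNat) (k - 1)).map
              (fun t => PySem.List.pyGetD cs j ' ' :: t)) := by
      rw [PySem.List.pyRange_one, PySem.List.pyRange_one]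
      have hcount : (((c :: cs).length : Int) - k + 1 - (0 + 1)).toNat
          = (((cs.length : Int) - k + 1) - 0).toNat := by
        simp only [List.length_cons]; push_cast; omega
      rw [hcount, List.flatMap_map, List.flatMap_map]
      apply List.flatMap_congr
      intro j hj
      have hidx : PySem.List.pyGetD (c :: cs) (0 + 1 + (j : Int)) ' '
          = PySem.List.pyGetD cs (0 + (j : Int)) ' ' := by
        have ha : (0 : Int) + 1 + (j : Int) = ((j + 1 : Nat) : Int) := by push_cast; omega
        have hb : (0 : Int) + (j : Int) = ((j : Nat) : Int) := by omega
        rw [ha, hb, PySem.List.pyGetD_natCast, PySem.List.pyGetD_natCast]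
        simp [List.getD]
      have hdrop : (c :: cs).drop ((0 + 1 + (j : Int)) + 1).toNat
          = cs.drop ((0 + (j : Int)) + 1).toNat := by
        have ha : ((0 : Int) + 1 + (j : Int) + 1).toNat = j + 2 := by omega
        have hb : ((0 : Int) + (j : Int) + 1).toNat = j + 1 := by omega
        rw [ha, hb]
        rfl
      rw [hf]
      simp only [hidx, hdrop]
    rw [hhead, htail]
    by_cases hcase : k < (cs.length : Int)
    · -- skip part is the whole loop for cs
      rw [ih hcase, pvCombs_cons c cs k (by omega)]
      rw [if_pos (by omega : k ≤ (cs.length : Int))]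
    · -- k = |cs|: a single tail term; both sides are the full combination of cs
      have hkeq : k = (cs.length : Int) := by
        have : k ≤ (cs.length : Int) := by
          simp only [List.length_cons] at hk; push_cast at hk; omega
        omega
      have hm1 : (cs.length : Int) - k + 1 = 1 := by omega
      rw [hm1]
      have hsing : PySem.List.pyRange (0 : Int) 1 1 = [0] := by decide
      rw [hsing]
      simp only [List.flatMap_cons, List.flatMap_nil, List.append_nil]
      have hcs : cs ≠ [] := by
        intro h; rw [h] at hkeq; simp at hkeq; omega
      obtain ⟨d, ds, rfl⟩ := List.exists_cons_of_ne_nil hcs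
      have hdrop : (d :: ds).drop ((0 : Int) + 1).toNat = ds := by norm_num
      have hidx : PySem.List.pyGetD (d :: ds) 0 ' ' = d := PySem.List.pyGetD_zero_cons _ _ _
      have hds : ds ≠ [] := by
        intro h; subst h; simp at hkeq; omega
      have hkm1 : k - 1 = (ds.length : Int) := by
        simp only [List.length_cons] at hkeq; push_cast at hkeq; omega
      have hfull1 : pvCombs ds (k - 1) = [ds] := by rw [hkm1, pvCombs_full ds hds]
      have hfull2 : pvCombs (d :: ds) k = [d :: ds] := by
        have hke : k = ((d :: ds).length : Int) := by
          simp only [List.length_cons] at hkeq ⊢; push_cast at hkeq ⊢; omega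
        rw [hke, pvCombs_full _ (by simp)]
      rw [hdrop, hidx, hfull1, pvCombs_cons c (d :: ds) k (by omega),
        if_pos (show k ≤ ((d :: ds).length : Int) by
          simp only [List.length_cons] at hkeq ⊢; push_cast at hkeq ⊢; omega),
        hfull2]
      simp

-- A's fueled recursion equals pvCombs whenever 1 ≤ k ≤ |s|.
lemma pvGenA_eq_pvCombs :
    ∀ (n : Nat) (s : List Char) (k : Int), k.toNat ≤ n → 1 ≤ k → k ≤ (s.length : Int) →
      pvGenA (k.toNat + 1) s k = pvCombs s k := by
  intro n
  induction n with
  | zero => intro s k hn h1 _; omega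
  | succ n ih =>
    intro s k hn h1 hk
    rw [pvGenA]
    simp only [PySem.List.len_eq]
    by_cases hfull : (s.length : Int) ≤ k
    · -- k = |s|: A yields the whole password; pvCombs yields the one full combination
      rw [if_pos hfull]
      have hkeq : k = (s.length : Int) := by omega
      have hs : s ≠ [] := by intro h; rw [h] at hkeq; simp at hkeq; omega
      rw [hkeq, pvCombs_full s hs]
    · rw [if_neg hfull]
      by_cases hk1 : k = 1
      · rw [if_pos hk1, hk1, pvCombs_one]
      · rw [if_neg hk1]
        have h2 : 2 ≤ k := by omega
        rw [← flat_eq_pvCombs k h2 s (by omega)]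
        apply List.flatMap_congr
        intro i hi
        rw [PySem.List.mem_pyRange_one] at hi
        have hslice : PySem.List.slice s (some (i + 1)) none = s.drop (i + 1).toNat :=
          PySem.List.slice_from s (by omega)
        have hfuel : k.toNat = (k - 1).toNat + 1 := by omega
        have hrec : pvGenA k.toNat (s.drop (i + 1).toNat) (k - 1)
            = pvCombs (s.drop (i + 1).toNat) (k - 1) := by
          rw [hfuel]
          apply ih _ _ (by omega) (by omega)
          rw [List.length_drop]
          omega
        rw [hslice, hrec]

-- ===== VERDICT (by name: the statement is the Claim_ definition above) =====
theorem GenTriplet_spec : Claim_equal_GenTriplet := by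
  intro password length _ hpre
  unfold Spec_GenTriplet GenTriplet GenTriplet_alt
  by_cases h : (password.toList.length : Int) ≤ length
  · rw [if_pos h, pvGenA]
    simp only [PySem.List.len_eq]
    rw [if_pos h]
    rfl
  · rw [if_neg h]
    have h1 : 1 ≤ length := by
      rcases hpre with h' | h'
      · exact absurd h' h
      · exact h'
    rw [pvGenA_eq_pvCombs length.toNat password.toList length le_rfl h1 (by omega)]
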